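-- pv_equiv track=rewrite | github.com/python/mypy | mypy/stubdoc.py | find_unique_signatures
-- ===== SOURCE A (Python) =====
-- from typing import Optional, MutableMapping, MutableSequence, List, Sequence, Tuple
--
-- Sig = Tuple[str, str]
--
-- def find_unique_signatures(sigs: Sequence[Sig]) -> List[Sig]:
--     """Remove names with duplicate found signatures."""
--     sig_map = {}  # type: MutableMapping[str, List[str]]
--     for name, sig in sigs:
--         sig_map.setdefault(name, []).append(sig)
--
--     result = []
--     for name, name_sigs in sig_map.items():
--         if len(set(name_sigs)) == 1:
--             result.append((name, name_sigs[0]))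
--     return sorted(result)
-- ===== SOURCE B (Python) =====
-- def find_unique_signatures(sigs):
--     """Remove names with duplicate found signatures."""
--     first = {}
--     conflicting = set()
--     for name, sig in sigs:
--         if name not in first:
--             first[name] = sig
--         elif first[name] != sig:
--             conflicting.add(name)
--     return sorted((name, s) for name, s in first.items() if name not in conflicting)
-- ===== Notes on version B (the rewrite author's own statement) =====
-- stated objective: simpler
-- what changed: Instead of grouping all signatures per name into lists and post-hoc testing len(set(...))==1, B detects conflicts incrementally in one pass with a first-seen-signature dict and a conflicting-name set, then emits the non-conflicting entries sorted.
import Mathlib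
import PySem

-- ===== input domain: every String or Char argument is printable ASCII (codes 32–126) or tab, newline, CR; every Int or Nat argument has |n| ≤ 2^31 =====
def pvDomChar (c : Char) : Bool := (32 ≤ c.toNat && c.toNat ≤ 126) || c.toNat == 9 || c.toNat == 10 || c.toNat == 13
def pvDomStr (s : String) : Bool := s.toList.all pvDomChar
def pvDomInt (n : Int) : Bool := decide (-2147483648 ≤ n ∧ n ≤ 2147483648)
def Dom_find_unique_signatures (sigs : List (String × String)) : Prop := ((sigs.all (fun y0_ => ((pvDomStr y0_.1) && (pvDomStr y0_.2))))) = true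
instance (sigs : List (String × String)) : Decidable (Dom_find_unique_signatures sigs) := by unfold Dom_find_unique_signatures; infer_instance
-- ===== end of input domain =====

-- B replaces A's group-everything-then-test-len(set)==1 pass with incremental conflict
-- detection (first-seen-signature dict + conflicting-name set) in one pass; objective: simpler.

-- ===== PORT A =====
def find_unique_signatures (sigs : List (String × String)) : List (String × String) :=
  -- sig_map.setdefault(name, []).append(sig)  ==  sig_map[name] = sig_map.get(name, []) + [sig]
  let sig_map : PySem.Dict String (List String) :=
    sigs.foldl (fun d p => d.modify p.1 [] (fun l => l ++ [p.2])) PySem.Dict.empty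
  let result : List (String × String) :=
    sig_map.items.foldl (fun acc p =>
      if PySem.Set.len (PySem.Set.ofList p.2) == 1 then
        acc ++ [(p.1, PySem.List.pyGetD p.2 0 "")]  -- name_sigs[0]: index into a nonempty list
      else acc) []
  PySem.List.sorted2 result Prod.fst Prod.snd

-- ===== PORT B =====
-- loop body of B: first-seen signature dict + conflicting-name set
def pvStepB (st : PySem.Dict String String × PySem.Set String) (p : String × String) :
    PySem.Dict String String × PySem.Set String :=
  if st.1.contains p.1 = false then (st.1.insert p.1 p.2, st.2)
  else if st.1.getD p.1 "" ≠ p.2 then (st.1, PySem.Set.add st.2 p.1)  -- first[name]: key present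
  else st

def find_unique_signatures_alt (sigs : List (String × String)) : List (String × String) :=
  let st := sigs.foldl pvStepB (PySem.Dict.empty, PySem.Set.empty)
  PySem.List.sorted2 (st.1.items.filter (fun p => !(PySem.Set.contains st.2 p.1)))
    Prod.fst Prod.snd

-- ===== PRECONDITION & SPEC =====
def Spec_find_unique_signatures (sigs : List (String × String)) (out : List (String × String)) : Prop := out = find_unique_signatures_alt sigs
instance (sigs : List (String × String)) (out : List (String × String)) : Decidable (Spec_find_unique_signatures sigs out) := by unfold Spec_find_unique_signatures; infer_instance

-- ===== CLAIM (what is proved, stated in full; the proofs are below) =====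
def Claim_equal_find_unique_signatures : Prop := ∀ (sigs : List (String × String)), Dom_find_unique_signatures sigs → Spec_find_unique_signatures sigs (find_unique_signatures sigs)

-- ===== LEMMAS AND PROOFS =====

-- the list of signatures recorded for name n (= sig_map[n] in A)
def pvGrp (sigs : List (String × String)) (n : String) : List String :=
  (sigs.filter (fun p => p.1 == n)).map Prod.snd

-- all elements equal to the first one
def pvAllSame (l : List String) : Bool := l.all (fun x => x == l.headD "")

theorem pvGrp_append (sigs : List (String × String)) (q : String × String) (n : String) :
    pvGrp (sigs ++ [q]) n = pvGrp sigs n ++ (if q.1 == n then [q.2] else []) := by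
  simp only [pvGrp, List.filter_append, List.map_append]
  by_cases h : q.1 = n <;> simp [h]

theorem pvGrp_eq_nil_iff (sigs : List (String × String)) (n : String) :
    pvGrp sigs n = [] ↔ n ∉ sigs.map Prod.fst := by
  simp only [pvGrp, List.map_eq_nil_iff, List.filter_eq_nil_iff, List.mem_map]
  constructor
  · rintro h ⟨p, hp, rfl⟩
    exact absurd (beq_self_eq_true p.1) (by simpa using h p hp)
  · intro h p hp
    simp only [beq_iff_eq]
    exact fun he => h ⟨p, hp, he⟩

theorem pvHeadD_append {l : List String} (h : l ≠ []) (s d : String) :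
    (l ++ [s]).headD d = l.headD d := by
  cases l with
  | nil => exact absurd rfl h
  | cons a t => rfl

theorem pvAllSame_append {l : List String} (h : l ≠ []) (s : String) :
    pvAllSame (l ++ [s]) = (pvAllSame l && (s == l.headD "")) := by
  cases l with
  | nil => exact absurd rfl h
  | cons a t => simp [pvAllSame, List.all_append, Bool.and_comm]

theorem pvAllSame_singleton (s : String) : pvAllSame [s] = true := by
  simp [pvAllSame]

theorem pvLen_one {l : List String} (h : l ≠ []) :
    (PySem.Set.len (PySem.Set.ofList l) == 1) = pvAllSame l := by
  cases l with
  | nil => exact absurd rfl h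
  | cons a t =>
    rw [PySem.Set.ofList_cons]
    have hiff : (PySem.Set.discard (PySem.Set.ofList t) a).length = 0 ↔ (∀ x ∈ t, x = a) := by
      rw [List.length_eq_zero_iff, List.eq_nil_iff_forall_not_mem]
      constructor
      · intro hd x hx
        by_contra hne
        exact hd x (by rw [PySem.Set.mem_discard _ _ _]; exact ⟨(PySem.Set.mem_ofList _ _).2 hx, hne⟩)
      · intro hall x hx
        rw [PySem.Set.mem_discard _ _ _, PySem.Set.mem_ofList _ _] at hx
        exact hx.2 (hall x hx.1)
    have hAll : pvAllSame (a :: t) = true ↔ ∀ x ∈ t, x = a := by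
      simp [pvAllSame]
    by_cases hc : ∀ x ∈ t, x = a
    · have h0 := hiff.2 hc
      simp only [PySem.Set.len, List.length_cons, h0, hAll.2 hc]
      rfl
    · have h0 : (PySem.Set.discard (PySem.Set.ofList t) a).length ≠ 0 := fun h => hc (hiff.1 h)
      have hA : pvAllSame (a :: t) = false := by
        cases hb : pvAllSame (a :: t)
        · rfl
        · exact absurd (hAll.1 hb) hc
      rw [hA]
      simp only [PySem.Set.len, List.length_cons]
      rw [beq_eq_false_iff_ne]
      omega

theorem pvPyGetD_zero (l : List String) : PySem.List.pyGetD l 0 "" = l.headD "" := by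
  cases l <;> simp [PySem.List.pyGetD, PySem.List.pyGet?, PySem.List.pyIdx?]

-- the single-pass fold of B characterised: first holds (name, first signature) in
-- first-seen order; the conflict set holds exactly the names with two distinct signatures
theorem pvB_fold (sigs : List (String × String)) :
    (sigs.foldl pvStepB (PySem.Dict.empty, PySem.Set.empty)).1.items
      = (PySem.Set.ofList (sigs.map Prod.fst)).map (fun n => (n, (pvGrp sigs n).headD ""))
  ∧ ∀ n : String, n ∈ (sigs.foldl pvStepB (PySem.Dict.empty, PySem.Set.empty)).2
      ↔ (n ∈ sigs.map Prod.fst ∧ pvAllSame (pvGrp sigs n) = false) := by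
  induction sigs using List.reverseRecOn with
  | nil => constructor <;> simp [PySem.Dict.empty, PySem.Set.empty]
  | append_singleton sigs q ih =>
    obtain ⟨h1, h2⟩ := ih
    set st := sigs.foldl pvStepB (PySem.Dict.empty, PySem.Set.empty) with hst
    have hkeys : st.1.keys = PySem.Set.ofList (sigs.map Prod.fst) := by
      simp only [PySem.Dict.keys, h1, List.map_map]
      simp [Function.comp_def]
    have hnodup : st.1.keys.Nodup := by rw [hkeys]; exact PySem.Set.nodup_ofList _
    rw [List.foldl_append, List.foldl_cons, List.foldl_nil]
    by_cases hq : q.1 ∈ sigs.map Prod.fst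
    · -- name already seen: the dict is unchanged
      have hc : st.1.contains q.1 = true := by
        rw [PySem.Dict.contains_iff_mem_keys, hkeys, PySem.Set.mem_ofList _ _]; exact hq
      have hgrpne : pvGrp sigs q.1 ≠ [] := fun h => ((pvGrp_eq_nil_iff _ _).1 h) hq
      have hmemitem : (q.1, (pvGrp sigs q.1).headD "") ∈ st.1.items := by
        rw [h1]; exact List.mem_map_of_mem (by rw [PySem.Set.mem_ofList _ _]; exact hq)
      have hgetD : st.1.getD q.1 "" = (pvGrp sigs q.1).headD "" :=
        PySem.Dict.getD_of_mem_items st.1 hmemitem hnodup ""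
      have hdict : (pvStepB st q).1 = st.1 := by
        unfold pvStepB
        rw [if_neg (by simp [hc])]
        split <;> rfl
      have hset : (pvStepB st q).2
          = if (pvGrp sigs q.1).headD "" ≠ q.2 then PySem.Set.add st.2 q.1 else st.2 := by
        unfold pvStepB
        rw [if_neg (by simp [hc]), hgetD]
        split <;> rfl
      have hitems1 : ((pvStepB st q).1).items
          = (PySem.Set.ofList ((sigs ++ [q]).map Prod.fst)).map
              (fun n => (n, (pvGrp (sigs ++ [q]) n).headD "")) := by
        rw [hdict, h1]
        simp only [List.map_append, List.map_cons, List.map_nil]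
        rw [PySem.Set.ofList_append_singleton,
          PySem.Set.add_of_mem (by rw [PySem.Set.mem_ofList _ _]; exact hq)]
        apply List.map_congr_left
        intro n hn
        rw [PySem.Set.mem_ofList _ _] at hn
        rw [pvGrp_append]
        by_cases hne : q.1 = n
        · subst hne
          rw [if_pos (beq_self_eq_true q.1), pvHeadD_append hgrpne]
        · have hbe : (q.1 == n) = false := by simp [hne]
          simp [hbe]
      refine ⟨hitems1, ?_⟩
      intro n
      rw [hset]
      by_cases hne : n = q.1
      · subst hne
        have hgrp' : pvGrp (sigs ++ [q]) q.1 = pvGrp sigs q.1 ++ [q.2] := by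
          rw [pvGrp_append, if_pos (beq_self_eq_true q.1)]
        have hall' : pvAllSame (pvGrp (sigs ++ [q]) q.1)
            = (pvAllSame (pvGrp sigs q.1) && (q.2 == (pvGrp sigs q.1).headD "")) := by
          rw [hgrp', pvAllSame_append hgrpne]
        by_cases hd : (pvGrp sigs q.1).headD "" = q.2
        · rw [if_neg (not_ne_iff.2 hd), h2, hall', hd]
          simp [hq]
        · have hb2 : (q.2 == (pvGrp sigs q.1).headD "") = false := by
            simp only [beq_eq_false_iff_ne, ne_eq]
            exact fun h => hd h.symm
          rw [if_pos hd, PySem.Set.mem_add _ _ _]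
          simp [hq, hall']
          exact fun _ h => hd (by simpa using h.symm)
      · have hbe : (q.1 == n) = false := by
          simp only [beq_eq_false_iff_ne, ne_eq]
          exact fun h => hne h.symm
        have hgrp' : pvGrp (sigs ++ [q]) n = pvGrp sigs n := by
          rw [pvGrp_append]; simp [hbe]
        have hmem' : n ∈ (sigs ++ [q]).map Prod.fst ↔ n ∈ sigs.map Prod.fst := by
          simp [hne]
        split
        · rw [PySem.Set.mem_add _ _ _, h2, hgrp', hmem']
          constructor
          · rintro (h | h)
            · exact h
            · exact absurd h hne
          · exact Or.inl
        · rw [h2, hgrp', hmem']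
    · -- fresh name: insert
      have hc : st.1.contains q.1 = false := by
        cases hb : st.1.contains q.1
        · rfl
        · rw [PySem.Dict.contains_iff_mem_keys, hkeys, PySem.Set.mem_ofList _ _] at hb
          exact absurd hb hq
      have hstep : pvStepB st q = (st.1.insert q.1 q.2, st.2) := by
        unfold pvStepB
        rw [if_pos hc]
      rw [hstep]
      have hgrpnil : pvGrp sigs q.1 = [] := (pvGrp_eq_nil_iff _ _).2 hq
      constructor
      · rw [PySem.Dict.items_insert_of_not_contains st.1 q.2 hc, h1]
        simp only [List.map_append, List.map_cons, List.map_nil]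
        rw [PySem.Set.ofList_append_singleton,
          PySem.Set.add_of_not_mem (by rw [PySem.Set.mem_ofList _ _]; exact hq)]
        rw [List.map_append]
        congr 1
        · apply List.map_congr_left
          intro n hn
          rw [PySem.Set.mem_ofList _ _] at hn
          have hbe : (q.1 == n) = false := by
            simp only [beq_eq_false_iff_ne, ne_eq]
            exact fun h => hq (h ▸ hn)
          rw [pvGrp_append]; simp [hbe]
        · simp only [List.map_cons, List.map_nil]
          rw [pvGrp_append, if_pos (beq_self_eq_true q.1)]
          simp [hgrpnil]
      · intro n
        by_cases hne : n = q.1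
        · subst hne
          have hgrp' : pvGrp (sigs ++ [q]) q.1 = [q.2] := by
            rw [pvGrp_append, if_pos (beq_self_eq_true q.1), hgrpnil, List.nil_append]
          constructor
          · intro h
            exact absurd ((h2 q.1).1 h).1 hq
          · rintro ⟨-, hall⟩
            rw [hgrp', pvAllSame_singleton] at hall
            exact absurd hall (by simp)
        · have hbe : (q.1 == n) = false := by
            simp only [beq_eq_false_iff_ne, ne_eq]
            exact fun h => hne h.symm
          have hgrp' : pvGrp (sigs ++ [q]) n = pvGrp sigs n := by
            rw [pvGrp_append]; simp [hbe]
          rw [h2, hgrp']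
          simp [hne]

-- A's fold characterised through the PySem grouping-loop lemmas
theorem pvA_char (sigs : List (String × String)) :
    find_unique_signatures sigs
      = PySem.List.sorted2
          (((PySem.Set.ofList (sigs.map Prod.fst)).filter
              (fun n => pvAllSame (pvGrp sigs n))).map
            (fun n => (n, (pvGrp sigs n).headD "")))
          Prod.fst Prod.snd := by
  unfold find_unique_signatures
  set d := sigs.foldl (fun d p => d.modify p.1 [] (fun l => l ++ [p.2]))
      (PySem.Dict.empty : PySem.Dict String (List String)) with hd
  have hkeys : d.keys = PySem.Set.ofList (sigs.map Prod.fst) := by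
    rw [hd, PySem.Dict.keys_foldl_modify_key sigs Prod.fst [] (fun _ p l => l ++ [p.2])]
    simp [PySem.Dict.keys]
    rfl
  have hnodup : d.keys.Nodup := by rw [hkeys]; exact PySem.Set.nodup_ofList _
  have hget : ∀ n, d.getD n [] = pvGrp sigs n := by
    intro n
    rw [hd, PySem.Dict.getD_foldl_modify_append sigs PySem.Dict.empty n]
    simp [PySem.Dict.getD_empty, pvGrp]
  have hitems : d.items = (PySem.Set.ofList (sigs.map Prod.fst)).map
      (fun n => (n, pvGrp sigs n)) := by
    rw [PySem.Dict.items_eq_map_keys d hnodup [], hkeys]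
    exact List.map_congr_left (fun n _ => by rw [hget])
  show PySem.List.sorted2
      (d.items.foldl (fun acc p =>
        if PySem.Set.len (PySem.Set.ofList p.2) == 1 then
          acc ++ [(p.1, PySem.List.pyGetD p.2 0 "")] else acc) [])
      Prod.fst Prod.snd = _
  rw [PySem.List.foldl_append_if
      (fun p : String × List String => PySem.Set.len (PySem.Set.ofList p.2) == 1)
      (fun p : String × List String => (p.1, PySem.List.pyGetD p.2 0 "")),
    List.nil_append, hitems, List.filter_map, List.map_map]
  congr 1
  have hfil : List.filter ((fun p => PySem.Set.len (PySem.Set.ofList p.2) == 1) ∘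
        (fun n => (n, pvGrp sigs n))) (PySem.Set.ofList (sigs.map Prod.fst))
      = List.filter (fun n => pvAllSame (pvGrp sigs n))
          (PySem.Set.ofList (sigs.map Prod.fst)) := by
    apply List.filter_congr
    intro n hn
    have hne : pvGrp sigs n ≠ [] := fun h =>
      ((pvGrp_eq_nil_iff _ _).1 h) ((PySem.Set.mem_ofList _ _).1 hn)
    simp only [Function.comp_apply]
    exact pvLen_one hne
  rw [hfil]
  apply List.map_congr_left
  intro n _
  simp only [Function.comp_apply, pvPyGetD_zero]

-- ===== VERDICT (by name: the statement is the Claim_ definition above) =====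
theorem find_unique_signatures_spec : Claim_equal_find_unique_signatures := by
  unfold Claim_equal_find_unique_signatures
  intro sigs _
  unfold Spec_find_unique_signatures
  rw [pvA_char]
  unfold find_unique_signatures_alt
  obtain ⟨h1, h2⟩ := pvB_fold sigs
  show _ = PySem.List.sorted2
      ((sigs.foldl pvStepB (PySem.Dict.empty, PySem.Set.empty)).1.items.filter
        (fun p => !(PySem.Set.contains
          (sigs.foldl pvStepB (PySem.Dict.empty, PySem.Set.empty)).2 p.1)))
      Prod.fst Prod.snd
  rw [h1, List.filter_map]
  congr 1
  have hfil : List.filter ((fun p => !(PySem.Set.contains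
          (sigs.foldl pvStepB (PySem.Dict.empty, PySem.Set.empty)).2 p.1)) ∘
        (fun n => (n, (pvGrp sigs n).headD ""))) (PySem.Set.ofList (sigs.map Prod.fst))
      = List.filter (fun n => pvAllSame (pvGrp sigs n))
          (PySem.Set.ofList (sigs.map Prod.fst)) := by
    apply List.filter_congr
    intro n hn
    have hmem : n ∈ sigs.map Prod.fst := (PySem.Set.mem_ofList _ _).1 hn
    simp only [Function.comp_apply, Bool.not_eq_eq_eq_not]
    cases hb : pvAllSame (pvGrp sigs n)
    · simp only [Bool.not_false]
      have : n ∈ (sigs.foldl pvStepB (PySem.Dict.empty, PySem.Set.empty)).2 :=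
        (h2 n).2 ⟨hmem, hb⟩
      simpa [PySem.Set.contains_iff] using this
    · simp only [Bool.not_true]
      have : n ∉ (sigs.foldl pvStepB (PySem.Dict.empty, PySem.Set.empty)).2 := by
        intro h
        have := ((h2 n).1 h).2
        rw [hb] at this
        exact absurd this (by simp)
      cases hcb : PySem.Set.contains (sigs.foldl pvStepB (PySem.Dict.empty, PySem.Set.empty)).2 n
      · rfl
      · exact absurd ((PySem.Set.contains_iff _ _).1 hcb) this
  rw [hfil]
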